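-- pv_equiv track=rewrite | github.com/derekdperez/nightmare | nightmare.py | _compute_worker_affinity_mask
-- ===== SOURCE A (Python) =====
-- def _compute_worker_affinity_mask(cpu_count: int, desired_cores: int | None) -> int:
--     total = max(1, int(cpu_count))
--     if desired_cores is None:
--         worker_cores = max(1, total // 2)
--         if total > 1:
--             worker_cores = min(worker_cores, total - 1)
--     else:
--         worker_cores = max(1, min(int(desired_cores), total))
--     mask = 0
--     for idx in range(worker_cores):
--         mask |= (1 << idx)
--     return mask if mask > 0 else 1
-- ===== SOURCE B (Python) =====
-- def _compute_worker_affinity_mask(cpu_count: int, desired_cores: int | None) -> int: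
--     total = int(cpu_count) if int(cpu_count) > 1 else 1
--     want = total // 2 if desired_cores is None else int(desired_cores)
--     worker_cores = max(1, min(want, total))
--     return (1 << worker_cores) - 1
-- ===== Notes on version B (the rewrite author's own statement) =====
-- stated objective: simpler
-- what changed: B collapses A's two-branch worker_cores logic into one clamp max(1, min(want, total)) of a single 'want' value (total//2 when desired_cores is None) and replaces the bit-by-bit OR accumulation loop plus the 'mask if mask > 0 else 1' tail with the closed form (1 << worker_cores) - 1.
import Mathlib
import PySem

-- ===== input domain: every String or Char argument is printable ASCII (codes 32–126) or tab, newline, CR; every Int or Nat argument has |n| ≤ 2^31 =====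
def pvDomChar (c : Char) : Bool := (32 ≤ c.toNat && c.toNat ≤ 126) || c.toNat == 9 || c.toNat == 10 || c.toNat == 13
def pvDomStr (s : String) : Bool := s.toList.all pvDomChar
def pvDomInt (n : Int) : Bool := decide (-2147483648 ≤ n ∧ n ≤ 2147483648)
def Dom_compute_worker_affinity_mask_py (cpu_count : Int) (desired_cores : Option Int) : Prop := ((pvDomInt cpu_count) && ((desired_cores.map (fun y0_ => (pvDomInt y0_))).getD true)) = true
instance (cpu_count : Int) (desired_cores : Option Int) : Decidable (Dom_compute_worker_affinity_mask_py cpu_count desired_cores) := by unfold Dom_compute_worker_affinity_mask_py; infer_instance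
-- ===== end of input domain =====

-- B clamps a single 'want' value with max/min (replacing A's two-branch guard logic) and
-- computes the mask by the closed form (1 << worker_cores) - 1 instead of A's bit-OR loop
-- (objective: simpler; return value proved equal).


-- ===== PORT A =====
-- literal port of A; `1 << idx` for the loop's idx ≥ 0 is exactly (2:Int) ^ idx.toNat
def compute_worker_affinity_mask_py (cpu_count : Int) (desired_cores : Option Int) : Int :=
  let total := max 1 cpu_count
  let worker_cores :=
    match desired_cores with
    | none =>
        let wc := max 1 (PySem.Int.floordiv total 2)
        if total > 1 then min wc (total - 1) else wc
    | some d => max 1 (min d total)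
  let mask := (PySem.List.pyRange 0 worker_cores 1).foldl
      (fun mask idx => PySem.Int.bor mask ((2 : Int) ^ idx.toNat)) 0
  if mask > 0 then mask else 1

-- ===== PORT B =====
-- literal port of Source B; worker_cores ≥ 1 ≥ 0, so `1 << worker_cores` is exactly (2:Int) ^ worker_cores.toNat
def compute_worker_affinity_mask_py_alt (cpu_count : Int) (desired_cores : Option Int) : Int :=
  let total := if cpu_count > 1 then cpu_count else 1
  let want := desired_cores.getD (PySem.Int.floordiv total 2)
  let worker_cores := max 1 (min want total)
  (2 : Int) ^ worker_cores.toNat - 1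

-- ===== PRECONDITION & SPEC =====
def Spec_compute_worker_affinity_mask_py (cpu_count : Int) (desired_cores : Option Int) (out : Int) : Prop := out = compute_worker_affinity_mask_py_alt cpu_count desired_cores
instance (cpu_count : Int) (desired_cores : Option Int) (out : Int) : Decidable (Spec_compute_worker_affinity_mask_py cpu_count desired_cores out) := by unfold Spec_compute_worker_affinity_mask_py; infer_instance

-- ===== CLAIM (what is proved, stated in full; the proofs are below) =====
def Claim_equal_compute_worker_affinity_mask_py : Prop := ∀ (cpu_count : Int) (desired_cores : Option Int), Dom_compute_worker_affinity_mask_py cpu_count desired_cores → Spec_compute_worker_affinity_mask_py cpu_count desired_cores (compute_worker_affinity_mask_py cpu_count desired_cores)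

-- ===== LEMMAS AND PROOFS =====

theorem pv_nat_or_pow (k : Nat) : (2^k - 1) ||| 2^k = 2^(k+1) - 1 := by
  apply Nat.eq_of_testBit_eq; intro i
  simp [Nat.testBit_two_pow_sub_one, Nat.testBit_two_pow]
  by_cases h : i ≤ k <;> simp [h] <;> omega

-- A's accumulation loop over range(n) computes 2^n - 1
theorem pv_mask_loop (n : Nat) :
    (PySem.List.pyRange 0 (n : Int) 1).foldl
      (fun mask idx => PySem.Int.bor mask ((2 : Int) ^ idx.toNat)) 0 = (2:Int)^n - 1 := by
  induction n with
  | zero => simp [PySem.List.pyRange_one_eq_nil]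
  | succ k ih =>
    rw [show ((k+1 : Nat) : Int) = (k:Int) + 1 by push_cast; ring,
        PySem.List.pyRange_one_succ_right (by positivity), List.foldl_append, ih]
    simp only [List.foldl]
    have h1 : ((2:Int)^k - 1) = (((2^k - 1 : Nat)) : Int) := by
      have hk1 : (1:Nat) ≤ 2^k := Nat.one_le_two_pow
      push_cast [hk1]; ring
    have h2 : ((2:Int)^(k:Int).toNat) = (((2^k : Nat)) : Int) := by
      push_cast; simp
    rw [h1, h2, PySem.Int.bor_natCast, pv_nat_or_pow]
    have hk : 1 ≤ 2^(k+1) := Nat.one_le_two_pow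
    push_cast [hk]; ring

theorem pv_tail (w : Int) (hw : 1 ≤ w) :
    (if (PySem.List.pyRange 0 w 1).foldl
        (fun mask idx => PySem.Int.bor mask ((2 : Int) ^ idx.toNat)) 0 > 0 then
      (PySem.List.pyRange 0 w 1).foldl
        (fun mask idx => PySem.Int.bor mask ((2 : Int) ^ idx.toNat)) 0
     else 1) = (2:Int) ^ w.toNat - 1 := by
  obtain ⟨n, rfl⟩ : ∃ n : Nat, w = (n : Int) := ⟨w.toNat, by omega⟩
  rw [pv_mask_loop n]
  have hn : 1 ≤ n := by omega
  have hpos : (0:Int) < 2 ^ n - 1 := by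
    have h2 : (2:Int)^1 ≤ 2 ^ n := pow_le_pow_right₀ (by norm_num) hn
    simp at h2; omega
  rw [if_pos hpos, Int.toNat_natCast]

theorem compute_worker_affinity_mask_eq (cpu_count : Int) (desired_cores : Option Int) :
    compute_worker_affinity_mask_py cpu_count desired_cores
      = compute_worker_affinity_mask_py_alt cpu_count desired_cores := by
  unfold compute_worker_affinity_mask_py compute_worker_affinity_mask_py_alt
  have htotB : (if cpu_count > 1 then cpu_count else 1) = max 1 cpu_count := by
    rcases max_cases (1:Int) cpu_count with ⟨h1, h2⟩ | ⟨h1, h2⟩ <;> rw [h1] <;> split_ifs <;> omega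
  rw [htotB]
  have htot : (1:Int) ≤ max 1 cpu_count := le_max_left _ _
  set total := max 1 cpu_count with hT
  have hfd : 0 ≤ PySem.Int.floordiv total 2 := by
    rw [PySem.Int.floordiv_eq_ediv_of_pos (by omega)]; omega
  -- A's worker_cores equals B's clamped 'want'
  have hwc : (match desired_cores with
      | none =>
          let wc := max 1 (PySem.Int.floordiv total 2)
          if total > 1 then min wc (total - 1) else wc
      | some d => max 1 (min d total))
      = max 1 (min (desired_cores.getD (PySem.Int.floordiv total 2)) total) := by
    cases desired_cores with
    | none =>
      simp only [Option.getD]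
      have hle : PySem.Int.floordiv total 2 ≤ total := by
        rw [PySem.Int.floordiv_eq_ediv_of_pos (by omega)]; omega
      have hlt : total > 1 → PySem.Int.floordiv total 2 ≤ total - 1 := by
        rw [PySem.Int.floordiv_eq_ediv_of_pos (by omega)]; omega
      rcases max_cases (1:Int) (PySem.Int.floordiv total 2) with ⟨h1, h2⟩ | ⟨h1, h2⟩ <;>
        rw [h1] <;> split_ifs with h3 <;>
        · rcases min_cases (PySem.Int.floordiv total 2) total with ⟨g1, g2⟩ | ⟨g1, g2⟩ <;>
            rw [g1] <;> omega
    | some d => rfl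
  simp only [hwc]
  apply pv_tail
  exact le_max_left _ _

-- ===== VERDICT (by name: the statement is the Claim_ definition above) =====
theorem compute_worker_affinity_mask_py_spec : Claim_equal_compute_worker_affinity_mask_py := by
  intro cpu_count desired_cores _
  exact (compute_worker_affinity_mask_eq cpu_count desired_cores).symm ▸ rfl
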